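-- pv_equiv track=rewrite | github.com/startup-test-test/real-estate-app | backend/simulator-api/validations.py | validate_url
-- ===== SOURCE A (Python) =====
-- from typing import Dict, List, Optional, Any
--
-- def validate_url(value: str) -> Optional[str]:
--     """URLの安全性チェック"""
--     if not value:
--         return None
--
--     dangerous_protocols = ['javascript:', 'data:', 'vbscript:', 'file:']
--     url_lower = value.lower()
--
--     for protocol in dangerous_protocols:
--         if url_lower.startswith(protocol):
--             return "許可されていないプロトコルです"
--
--     return None
-- ===== SOURCE B (Python) =====
-- def validate_url(value):
--     """URLの安全性チェック"""
--     if not value: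
--         return None
--     scheme, sep, _ = value.lower().partition(':')
--     if sep and scheme in {'javascript', 'data', 'vbscript', 'file'}:
--         return "許可されていないプロトコルです"
--     return None
-- ===== Notes on version B (the rewrite author's own statement) =====
-- stated objective: alternative
-- what changed: Replaces the per-prefix startswith loop by a single parse: split off the scheme before the first colon and test it with one set-membership check (only if a colon is actually present).
import Mathlib
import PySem

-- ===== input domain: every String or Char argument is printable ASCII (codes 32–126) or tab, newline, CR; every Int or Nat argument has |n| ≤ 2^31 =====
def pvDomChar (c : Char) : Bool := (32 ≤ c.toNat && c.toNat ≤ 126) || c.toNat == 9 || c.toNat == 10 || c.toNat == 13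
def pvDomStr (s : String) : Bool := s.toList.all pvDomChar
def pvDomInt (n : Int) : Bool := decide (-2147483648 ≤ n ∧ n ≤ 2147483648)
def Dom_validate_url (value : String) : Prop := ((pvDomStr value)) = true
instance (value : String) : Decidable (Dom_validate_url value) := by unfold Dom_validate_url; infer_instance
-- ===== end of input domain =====

-- B parses the scheme before the first colon once and tests set membership, instead of A's per-prefix startswith loop; same return value everywhere.
-- ===== PORT A =====
-- B replaces A's per-prefix startswith loop by one parse (scheme before the first colon) plus a set-membership test; same return value on every input.
-- the 'for protocol in dangerous_protocols' loop of A, returning on the first match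
def validateLoopA (url_lower : String) : List String → Option String
  | [] => none
  | p :: rest =>
    if PySem.Str.startswith url_lower p then some "許可されていないプロトコルです"
    else validateLoopA url_lower rest

def validate_url (value : String) : Option String :=
  if value == "" then none
  else
    let dangerous_protocols := ["javascript:", "data:", "vbscript:", "file:"]
    let url_lower := PySem.Str.lower value
    validateLoopA url_lower dangerous_protocols

-- ===== PORT B =====
-- the set {'javascript','data','vbscript','file'} of dangerous schemes (as char lists: string facts live on the list side)
def dangerousSchemes : List (List Char) := ["javascript".toList, "data".toList, "vbscript".toList, "file".toList]

def validate_url_alt (value : String) : Option String :=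
  if value == "" then none
  else
    -- value.lower().partition(':'): scheme = chars before the first ':'; sep nonempty iff ':' occurs
    let L := PySem.Chars.lower value.toList
    let scheme := L.takeWhile (fun c => c ≠ ':')
    if L.contains ':' && dangerousSchemes.contains scheme then some "許可されていないプロトコルです"
    else none

-- ===== PRECONDITION & SPEC =====
def Spec_validate_url (value : String) (out : Option String) : Prop := out = validate_url_alt value
instance (value : String) (out : Option String) : Decidable (Spec_validate_url value out) := by unfold Spec_validate_url; infer_instance

-- ===== CLAIM (what is proved, stated in full; the proofs are below) =====
def Claim_equal_validate_url : Prop := ∀ (value : String), Dom_validate_url value → Spec_validate_url value (validate_url value)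

-- ===== LEMMAS AND PROOFS =====
theorem prefix_colon_iff (p L : List Char) (hp : (':' : Char) ∉ p) :
    (p ++ [':']) <+: L ↔ ((':' : Char) ∈ L ∧ L.takeWhile (fun c => c ≠ ':') = p) := by
  induction L generalizing p with
  | nil => simp
  | cons c t ih =>
    cases p with
    | nil =>
      by_cases hc : c = ':'
      · subst hc; simp
      · simp [List.cons_prefix_cons, hc, Ne.symm hc]
    | cons a as =>
      have ha : a ≠ ':' := fun h => hp (h ▸ List.mem_cons_self)
      have has : (':' : Char) ∉ as := fun h => hp (List.mem_cons_of_mem _ h)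
      by_cases hc : c = ':'
      · subst hc
        simp [List.cons_prefix_cons, ha]
      · rw [List.takeWhile_cons_of_pos (by simp [hc])]
        simp only [List.cons_append, List.cons_prefix_cons, List.mem_cons, List.cons.injEq]
        rw [ih as has]
        constructor
        · rintro ⟨rfl, hm, ht⟩; exact ⟨Or.inr hm, rfl, ht⟩
        · rintro ⟨hm, rfl, ht⟩
          rcases hm with h | hm
          · exact absurd h.symm hc
          · exact ⟨rfl, hm, ht⟩

theorem startswith_colon_eq (L p : List Char) (hp : (':' : Char) ∉ p) :
    PySem.Chars.startswith L (p ++ [':']) =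
      (L.contains ':' && (L.takeWhile (fun c => c ≠ ':') == p)) := by
  rw [Bool.eq_iff_iff, PySem.Chars.startswith_iff, prefix_colon_iff p L hp]
  simp

theorem loopA_eq (u : String) (ps : List String) :
    validateLoopA u ps =
      if ps.any (fun p => PySem.Str.startswith u p) then some "許可されていないプロトコルです" else none := by
  induction ps with
  | nil => simp [validateLoopA]
  | cons p rest ih =>
    simp only [validateLoopA, List.any_cons, ih, Bool.or_eq_true]
    split_ifs with h1 h2 h3 <;> first | rfl | (exfalso; tauto)

-- ===== VERDICT (by name: the statement is the Claim_ definition above) =====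
theorem validate_url_spec : Claim_equal_validate_url := by
  intro value _
  unfold Spec_validate_url
  unfold validate_url validate_url_alt
  by_cases hv : value == ""
  · simp [hv]
  · simp only [hv, Bool.false_eq_true, if_false, loopA_eq, List.any_cons, List.any_nil,
      Bool.or_false]
    have e1 : ("javascript:" : String).toList = "javascript".toList ++ [':'] := by decide
    have e2 : ("data:" : String).toList = "data".toList ++ [':'] := by decide
    have e3 : ("vbscript:" : String).toList = "vbscript".toList ++ [':'] := by decide
    have e4 : ("file:" : String).toList = "file".toList ++ [':'] := by decide
    simp only [PySem.Str.startswith_eq, PySem.Str.toList_lower, e1, e2, e3, e4,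
      startswith_colon_eq _ _ (by decide : (':' : Char) ∉ "javascript".toList),
      startswith_colon_eq _ _ (by decide : (':' : Char) ∉ "data".toList),
      startswith_colon_eq _ _ (by decide : (':' : Char) ∉ "vbscript".toList),
      startswith_colon_eq _ _ (by decide : (':' : Char) ∉ "file".toList),
      dangerousSchemes, List.contains_cons, List.contains_nil]
    cases (PySem.Chars.lower value.toList).contains ':' <;> simp [Bool.and_or_distrib_left]
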